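-- pv_equiv track=rewrite | github.com/rsusny-wq/infinitra-dixon-chatbot | cdk-infrastructure/lambda/customer_communication_service.py | _generate_simple_summary
-- ===== SOURCE A (Python) =====
-- from typing import Dict, List, Any, Optional
--
-- def _generate_simple_summary(messages: List[Dict[str, Any]]) -> str:
--     """Fallback simple summary generation"""
--     customer_messages = [msg for msg in messages if msg.get('sender') == 'user']
--     ai_messages = [msg for msg in messages if msg.get('sender') == 'assistant']
--
--     summary = f"Conversation with {len(customer_messages)} customer messages and {len(ai_messages)} AI responses. "
--
--     if customer_messages:
--         first_message = customer_messages[0].get('content', '')[:100]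
--         summary += f"Initial concern: {first_message}..."
--
--     return summary
-- ===== SOURCE B (Python) =====
-- from typing import Dict, List, Any, Optional
--
-- def _generate_simple_summary(messages: List[Dict[str, Any]]) -> str:
--     """Single-pass summary: two counters plus the first user message's content."""
--     customer_count = 0
--     ai_count = 0
--     first_content = None
--     for msg in messages:
--         sender = msg.get('sender')
--         if sender == 'user':
--             customer_count += 1
--             if first_content is None:
--                 first_content = msg.get('content', '')[:100]
--         elif sender == 'assistant':
--             ai_count += 1
--     summary = f"Conversation with {customer_count} customer messages and {ai_count} AI responses. "
--     if first_content is not None: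
--         summary += f"Initial concern: {first_content}..."
--     return summary
-- ===== Notes on version B (the rewrite author's own statement) =====
-- stated objective: alternative
-- what changed: Replaces the two list-building filter comprehensions and the later index into the first list with one loop over messages that maintains two integer counters and captures the first user message's truncated content in an Option/None-seeded variable.
import Mathlib
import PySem

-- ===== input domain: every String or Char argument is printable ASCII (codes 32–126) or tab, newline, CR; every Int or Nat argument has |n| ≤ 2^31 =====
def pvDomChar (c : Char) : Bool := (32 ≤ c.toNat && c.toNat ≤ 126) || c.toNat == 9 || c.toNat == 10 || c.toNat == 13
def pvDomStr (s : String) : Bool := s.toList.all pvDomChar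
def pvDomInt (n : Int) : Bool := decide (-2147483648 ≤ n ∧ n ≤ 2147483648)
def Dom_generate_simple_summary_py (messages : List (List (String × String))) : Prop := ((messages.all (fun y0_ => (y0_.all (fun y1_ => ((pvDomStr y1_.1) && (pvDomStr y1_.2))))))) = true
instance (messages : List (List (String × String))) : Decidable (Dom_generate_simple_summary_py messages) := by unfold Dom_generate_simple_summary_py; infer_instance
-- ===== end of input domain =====

-- B changes the decomposition only (single loop with counters instead of two filter passes); same cost, return value proved identical.

-- ===== PORT A =====
-- msg.get('content', '')[:100], used by both ports on the message they truncate
def pvFirst100 (msg : List (String × String)) : String :=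
  PySem.Str.slice ((msg.lookup "content").getD "") none (some 100)

def generate_simple_summary_py (messages : List (List (String × String))) : String :=
  let customer_messages := messages.filter (fun msg => msg.lookup "sender" == some "user")
  let ai_messages := messages.filter (fun msg => msg.lookup "sender" == some "assistant")
  let summary := "Conversation with " ++ PySem.Int.toStr (PySem.List.len customer_messages) ++
    " customer messages and " ++ PySem.Int.toStr (PySem.List.len ai_messages) ++ " AI responses. "
  match customer_messages with
  | [] => summary
  | first :: _ =>
      let first_message := pvFirst100 first
      summary ++ "Initial concern: " ++ first_message ++ "..."

-- ===== PORT B =====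
-- one fold over messages: (customer_count, ai_count, first_content)
def pvStep (s : Int × Int × Option String) (msg : List (String × String)) : Int × Int × Option String :=
  let sender := msg.lookup "sender"
  if sender == some "user" then
    (s.1 + 1, s.2.1,
      match s.2.2 with
      | none => some (pvFirst100 msg)
      | some c => some c)
  else if sender == some "assistant" then (s.1, s.2.1 + 1, s.2.2)
  else s

def generate_simple_summary_py_alt (messages : List (List (String × String))) : String :=
  let st := messages.foldl pvStep (0, 0, none)
  let summary := "Conversation with " ++ PySem.Int.toStr st.1 ++
    " customer messages and " ++ PySem.Int.toStr st.2.1 ++ " AI responses. "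
  match st.2.2 with
  | none => summary
  | some c => summary ++ "Initial concern: " ++ c ++ "..."

-- ===== PRECONDITION & SPEC =====
def Spec_generate_simple_summary_py (messages : List (List (String × String))) (out : String) : Prop := out = generate_simple_summary_py_alt messages
instance (messages : List (List (String × String))) (out : String) : Decidable (Spec_generate_simple_summary_py messages out) := by unfold Spec_generate_simple_summary_py; infer_instance

-- ===== CLAIM (what is proved, stated in full; the proofs are below) =====
def Claim_equal_generate_simple_summary_py : Prop := ∀ (messages : List (List (String × String))), Dom_generate_simple_summary_py messages → Spec_generate_simple_summary_py messages (generate_simple_summary_py messages)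

-- ===== LEMMAS AND PROOFS =====

-- the fold state after processing ms from (a, b, o)
theorem pvStep_foldl (ms : List (List (String × String))) :
    ∀ (a b : Int) (o : Option String),
      ms.foldl pvStep (a, b, o) =
        (a + (ms.countP (fun msg => msg.lookup "sender" == some "user") : Int),
         b + (ms.countP (fun msg => msg.lookup "sender" == some "assistant") : Int),
         o.or ((ms.filter (fun msg => msg.lookup "sender" == some "user")).head?.map pvFirst100)) := by
  induction ms with
  | nil => intro a b o; simp
  | cons m t ih =>
    intro a b o
    by_cases hu : (m.lookup "sender" == some "user") = true
    · have hna : (m.lookup "sender" == some "assistant") = false := by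
        rw [beq_iff_eq] at hu; simp [hu]
      cases o with
      | none =>
          simp [List.foldl_cons, pvStep, hu, hna, ih]
          ring
      | some c =>
          simp [List.foldl_cons, pvStep, hu, hna, ih]
          ring
    · by_cases ha : (m.lookup "sender" == some "assistant") = true
      · simp [List.foldl_cons, pvStep, hu, ha, ih]
        ring
      · simp [List.foldl_cons, pvStep, hu, ha, ih, List.countP_cons]

-- ===== VERDICT (by name: the statement is the Claim_ definition above) =====
theorem generate_simple_summary_py_spec : Claim_equal_generate_simple_summary_py := by
  unfold Claim_equal_generate_simple_summary_py
  intro messages _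
  unfold Spec_generate_simple_summary_py generate_simple_summary_py generate_simple_summary_py_alt
  rw [pvStep_foldl]
  simp only [Option.or, Option.map, PySem.List.len_eq, List.countP_eq_length_filter,
    zero_add]
  cases h : messages.filter (fun msg => msg.lookup "sender" == some "user") with
  | nil => simp
  | cons first rest => simp
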